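-- pv_equiv track=rewrite | github.com/racerandom/JaMIE | utils.py | sbwmod2mod
-- ===== SOURCE A (Python) =====
-- def sbwmod2mod(sbw_sent_mod, aligned_ids):
--     sent_mod = []
--     for index, sbw_mod in enumerate(sbw_sent_mod):
--         if index > 0:
--             if aligned_ids[index] == aligned_ids[index - 1]:
--                 sent_mod[-1] = sbw_mod
--             else:
--                 sent_mod.append(sbw_mod)
--         else:
--             sent_mod.append(sbw_mod)
--     return sent_mod
-- ===== SOURCE B (Python) =====
-- def sbwmod2mod(sbw_sent_mod, aligned_ids):
--     n = len(sbw_sent_mod)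
--     return [sbw_sent_mod[i] for i in range(n)
--             if i == n - 1 or aligned_ids[i + 1] != aligned_ids[i]]
-- ===== Notes on version B (the rewrite author's own statement) =====
-- stated objective: simpler
-- what changed: Replaces A's stateful loop that appends or overwrites the last element of a mutable accumulator by a single comprehension that keeps sbw_sent_mod[i] exactly when i is the last index of a run of consecutive-equal aligned_ids.
import Mathlib
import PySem

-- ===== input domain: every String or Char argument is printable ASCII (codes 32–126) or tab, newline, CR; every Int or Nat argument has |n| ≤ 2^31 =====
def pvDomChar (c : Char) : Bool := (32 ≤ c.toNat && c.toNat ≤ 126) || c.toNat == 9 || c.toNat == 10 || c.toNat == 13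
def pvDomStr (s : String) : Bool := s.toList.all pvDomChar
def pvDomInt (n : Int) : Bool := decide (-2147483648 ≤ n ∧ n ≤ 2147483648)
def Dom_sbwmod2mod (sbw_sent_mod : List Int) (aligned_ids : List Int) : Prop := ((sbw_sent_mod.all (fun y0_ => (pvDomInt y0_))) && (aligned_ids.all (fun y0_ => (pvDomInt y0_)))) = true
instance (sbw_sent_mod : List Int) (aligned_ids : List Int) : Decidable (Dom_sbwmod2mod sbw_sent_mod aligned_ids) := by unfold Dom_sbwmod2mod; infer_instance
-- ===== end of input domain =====

-- B replaces A's mutating accumulator loop by a single comprehension that keeps the element at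
-- the last index of each run of consecutive-equal alignment ids (objective: simpler).

-- ===== PORT A =====
-- the `for index, sbw_mod in enumerate(sbw_sent_mod)` loop, index carried explicitly;
-- aligned_ids[index] is pyGetD (out-of-range default never reached inside Pre_);
-- `sent_mod[-1] = sbw_mod` is dropLast ++ [sbw_mod] (sent_mod is nonempty whenever index > 0)
def sbwmod2modLoop (aligned_ids : List Int) : List Int → Nat → List Int → List Int
  | [], _, sent_mod => sent_mod
  | sbw_mod :: rest, index, sent_mod =>
    let sent_mod' :=
      if index > 0 then
        if PySem.List.pyGetD aligned_ids (index : Int) 0 = PySem.List.pyGetD aligned_ids ((index : Int) - 1) 0 then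
          sent_mod.dropLast ++ [sbw_mod]
        else sent_mod ++ [sbw_mod]
      else sent_mod ++ [sbw_mod]
    sbwmod2modLoop aligned_ids rest (index + 1) sent_mod'

def sbwmod2mod (sbw_sent_mod : List Int) (aligned_ids : List Int) : List Int :=
  sbwmod2modLoop aligned_ids sbw_sent_mod 0 []

-- ===== PORT B =====
-- the comprehension of Source B: keep sbw_sent_mod[i] iff i is the last index of its run
def sbwmod2mod_alt (sbw_sent_mod : List Int) (aligned_ids : List Int) : List Int :=
  let n := sbw_sent_mod.length
  (List.range n).filterMap (fun i =>
    if i = n - 1 ∨ PySem.List.pyGetD aligned_ids ((i : Int) + 1) 0 ≠ PySem.List.pyGetD aligned_ids (i : Int) 0 then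
      some (PySem.List.pyGetD sbw_sent_mod (i : Int) 0)
    else none)

-- ===== PRECONDITION & SPEC =====
-- A raises IndexError iff sbw_sent_mod has ≥ 2 elements and aligned_ids is shorter than it
def Pre_sbwmod2mod (sbw_sent_mod : List Int) (aligned_ids : List Int) : Prop :=
  sbw_sent_mod.length ≤ 1 ∨ sbw_sent_mod.length ≤ aligned_ids.length
instance (sbw_sent_mod : List Int) (aligned_ids : List Int) : Decidable (Pre_sbwmod2mod sbw_sent_mod aligned_ids) := by unfold Pre_sbwmod2mod; infer_instance

def pvWitness_sbwmod2mod : List Int × List Int := ([1, 2, 3, 4], [0, 0, 1, 2])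

def Spec_sbwmod2mod (sbw_sent_mod : List Int) (aligned_ids : List Int) (out : List Int) : Prop := out = sbwmod2mod_alt sbw_sent_mod aligned_ids
instance (sbw_sent_mod : List Int) (aligned_ids : List Int) (out : List Int) : Decidable (Spec_sbwmod2mod sbw_sent_mod aligned_ids out) := by unfold Spec_sbwmod2mod; infer_instance

-- ===== CLAIM (what is proved, stated in full; the proofs are below) =====
def Claim_equal_sbwmod2mod : Prop := ∀ (sbw_sent_mod : List Int) (aligned_ids : List Int), Dom_sbwmod2mod sbw_sent_mod aligned_ids → Pre_sbwmod2mod sbw_sent_mod aligned_ids → Spec_sbwmod2mod sbw_sent_mod aligned_ids (sbwmod2mod sbw_sent_mod aligned_ids)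

-- ===== LEMMAS AND PROOFS =====

-- common description: last modality of each run of consecutive-equal ids, with p the pending
-- modality of the current run and prev its id
def hRuns : Int → Int → List Int → List Int → List Int
  | p, _, [], _ => [p]
  | p, _, _ :: _, [] => [p]
  | p, prev, m :: rest, i :: irest =>
      if i = prev then hRuns m i rest irest else p :: hRuns m i rest irest

theorem loopA_eq_hRuns (a : List Int) (rest : List Int) :
    ∀ (k : Nat) (acc : List Int) (p : Int), 1 ≤ k → k + rest.length ≤ a.length →
    sbwmod2modLoop a rest k (acc ++ [p]) = acc ++ hRuns p (a.getD (k - 1) 0) rest (a.drop k) := by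
  induction rest with
  | nil =>
    intro k acc p hk hlen
    simp [sbwmod2modLoop, hRuns]
  | cons m rest ih =>
    intro k acc p hk hlen
    have hklt : k < a.length := by simp at hlen; omega
    have hdrop : a.drop k = a[k] :: a.drop (k + 1) := (List.getElem_cons_drop hklt).symm
    have hcast : ((k : Int) - 1) = ((k - 1 : Nat) : Int) := by omega
    have hgd : a.getD k 0 = a[k] := by
      rw [List.getD_eq_getElem?_getD, List.getElem?_eq_getElem hklt]; rfl
    have hgk : PySem.List.pyGetD a (k : Int) 0 = a[k] := by
      rw [PySem.List.pyGetD_natCast, hgd]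
    have hgk1 : PySem.List.pyGetD a ((k : Int) - 1) 0 = a.getD (k - 1) 0 := by
      rw [hcast, PySem.List.pyGetD_natCast]
    have hpos : k > 0 := hk
    simp only [sbwmod2modLoop, hgk, hgk1, hdrop, hRuns, hpos, if_true]
    by_cases heq : a[k] = a.getD (k - 1) 0
    · rw [if_pos heq, if_pos heq, List.dropLast_concat]
      have hih := ih (k + 1) acc m (by omega) (by simp at hlen ⊢; omega)
      simp only [Nat.add_sub_cancel] at hih
      rw [hih, hgd]
    · rw [if_neg heq, if_neg heq,
        show acc ++ [p] ++ [m] = (acc ++ [p]) ++ [m] from rfl]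
      have hih := ih (k + 1) (acc ++ [p]) m (by omega) (by simp at hlen ⊢; omega)
      simp only [Nat.add_sub_cancel] at hih
      rw [hih, hgd]
      simp

-- B's comprehension body as a named function (definitionally sbwmod2mod_alt's body)
def altF (s a : List Int) (j : Nat) : Option Int :=
  if j = s.length - 1 ∨ PySem.List.pyGetD a ((j : Int) + 1) 0 ≠ PySem.List.pyGetD a (j : Int) 0 then
    some (PySem.List.pyGetD s (j : Int) 0)
  else none

theorem alt_eq_filterMap (s a : List Int) :
    sbwmod2mod_alt s a = (List.range s.length).filterMap (altF s a) := rfl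

theorem filterMap_range_succ {α : Type} (f : Nat → Option α) (n : Nat) :
    List.filterMap f (List.range (n + 1)) =
      (f 0).toList ++ List.filterMap (fun j => f (j + 1)) (List.range n) := by
  rw [List.range_succ_eq_map, List.filterMap_cons, List.filterMap_map]
  cases h : f 0 with
  | none => simp [Nat.succ_eq_add_one]
  | some b => simp [Nat.succ_eq_add_one]

theorem altF_succ (m : Int) (s : List Int) (i : Int) (a : List Int) (j : Nat) (hs : s ≠ []) :
    altF (m :: s) (i :: a) (j + 1) = altF s a j := by
  cases s with
  | nil => simp at hs
  | cons x xs =>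
    simp only [altF, List.length_cons]
    have c1 : (((j + 1 : Nat) : Int) + 1) = ((j + 2 : Nat) : Int) := by push_cast; ring
    have c2 : ((j : Int) + 1) = ((j + 1 : Nat) : Int) := by push_cast; ring
    rw [c1, c2]
    simp only [PySem.List.pyGetD_natCast]
    rw [show j + 2 = (j + 1) + 1 from rfl]
    simp only [List.getD_cons_succ]
    have hidx : (j + 1 = xs.length + 1 + 1 - 1) ↔ (j = xs.length + 1 - 1) := by omega
    by_cases hc : j = xs.length + 1 - 1 ∨ a.getD (j + 1) 0 ≠ a.getD j 0
    · rw [if_pos (by tauto), if_pos hc]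
    · rw [if_neg (by tauto), if_neg hc]

theorem altF_zero (m m2 : Int) (rest' : List Int) (i i2 : Int) (a'' : List Int) :
    altF (m :: m2 :: rest') (i :: i2 :: a'') 0 = if i2 = i then none else some m := by
  have h0 : ((0 : Nat) : Int) = 0 := rfl
  by_cases h : i2 = i <;>
    simp [altF, h, eq_comm, PySem.List.pyGetD]

theorem alt_cons₂ (m m2 : Int) (rest' : List Int) (i i2 : Int) (a'' : List Int) :
    sbwmod2mod_alt (m :: m2 :: rest') (i :: i2 :: a'') =
      (if i2 = i then [] else [m]) ++ sbwmod2mod_alt (m2 :: rest') (i2 :: a'') := by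
  rw [alt_eq_filterMap, alt_eq_filterMap]
  simp only [List.length_cons]
  rw [filterMap_range_succ, altF_zero]
  rw [List.filterMap_congr
    (fun j _ => altF_succ m (m2 :: rest') i (i2 :: a'') j (by simp))]
  by_cases h : i2 = i <;> simp [h]

theorem alt_eq_hRuns : ∀ (rest : List Int) (m : Int) (i : Int) (a' : List Int),
    rest.length ≤ a'.length →
    sbwmod2mod_alt (m :: rest) (i :: a') = hRuns m i rest a' := by
  intro rest
  induction rest with
  | nil =>
    intro m i a' _
    simp [sbwmod2mod_alt, hRuns, List.range_succ, PySem.List.pyGetD_natCast]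
  | cons m2 rest' ih =>
    intro m i a' hlen
    cases a' with
    | nil => simp at hlen
    | cons i2 a'' =>
      rw [alt_cons₂, ih m2 i2 a'' (by simpa using hlen)]
      simp only [hRuns]
      by_cases h : i2 = i <;> simp [h]

-- the final theorem, assembled by cases on the shape of the inputs
theorem sbwmod2mod_eq (s a : List Int) (hpre : Pre_sbwmod2mod s a) :
    sbwmod2mod s a = sbwmod2mod_alt s a := by
  cases s with
  | nil => simp [sbwmod2mod, sbwmod2modLoop, sbwmod2mod_alt]
  | cons m rest =>
    cases a with
    | nil =>
      have hr : rest = [] := by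
        rcases hpre with h | h
        · simp at h; omega
        · simp at h
      subst hr
      simp [sbwmod2mod, sbwmod2modLoop, sbwmod2mod_alt, List.range_succ, PySem.List.pyGetD_natCast]
    | cons i a' =>
      cases rest with
      | nil =>
        simp [sbwmod2mod, sbwmod2modLoop, sbwmod2mod_alt, List.range_succ, PySem.List.pyGetD_natCast]
      | cons m2 rest' =>
        have hlen : (m2 :: rest').length ≤ a'.length := by
          rcases hpre with h | h
          · simp at h
          · simpa using h
        have hA : sbwmod2mod (m :: m2 :: rest') (i :: a') =
            hRuns m ((i :: a').getD 0 0) (m2 :: rest') ((i :: a').drop 1) := by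
          have := loopA_eq_hRuns (i :: a') (m2 :: rest') 1 [] m le_rfl (by simp at hlen ⊢; omega)
          simpa [sbwmod2mod, sbwmod2modLoop] using this
        rw [hA, alt_eq_hRuns (m2 :: rest') m i a' hlen]
        simp

-- ===== VERDICT (by name: the statement is the Claim_ definition above) =====
theorem sbwmod2mod_spec : Claim_equal_sbwmod2mod := by
  intro s a _ hpre
  exact sbwmod2mod_eq s a hpre
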